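-- pv_equiv track=rewrite | github.com/julka5/MyCodewarsSolutions | A Rule of Divisibility by 13.py | thirt
-- ===== SOURCE A (Python) =====
-- def thirt(n):
--     lst = [1, 10, 9, 12, 3, 4]
--     i = 0
--     sumn = n
--     ind = True
--     while ind:
--         lofnum = [int(i) for i in str(sumn)[::-1]]
--         for j in range(len(lofnum)):
--             if i >= len(lst):
--                 i=0
--             lofnum[j] = lofnum[j]*lst[i]
--             i += 1
--         i = 0
--         if sum(lofnum) == sumn:
--             ind = False
--         sumn = sum(lofnum)
--
--     return sumn
-- ===== SOURCE B (Python) =====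
-- def thirt(n):
--     # Input validation: like the original, non-negative integers only.
--     if n < 0:
--         raise ValueError("thirt is defined for non-negative integers")
--     # The weighted digit sum S (weights 1,10,9,12,3,4 cycling) satisfies S(x) = x
--     # exactly when x < 100 (for x >= 100 the weight of the k-th digit, k >= 2, is
--     # strictly below 10**k, so S(x) < x).  So instead of recomputing S to detect a
--     # fixed point, loop while n >= 100; and instead of weighting digits one by one,
--     # consume base-100 pairs: a pair p at group j contributes p itself (weights 1,10),
--     # 9*(p%10)+12*(p//10), or 3*(p%10)+4*(p//10), with j cycling over 3 groups.
--     while n >= 100: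
--         total, x, j = 0, n, 0
--         while x > 0:
--             p, x = x % 100, x // 100
--             if j == 0:
--                 total += p
--             elif j == 1:
--                 total += 9 * (p % 10) + 12 * (p // 10)
--             else:
--                 total += 3 * (p % 10) + 4 * (p // 10)
--             j = (j + 1) % 3
--         n = total
--     return n
-- ===== Notes on version B (the rewrite author's own statement) =====
-- stated objective: alternative
-- what changed: B replaces A's fixed-point detection (recompute the weighted sum and compare with the current value) by the loop condition n >= 100, using the fact that the fixed points of the weighted digit sum are exactly the values below 100, and it computes each pass over base-100 pairs with one closed formula per weight group (p itself, 9*(p%10)+12*(p//10), 3*(p%10)+4*(p//10)) instead of A's reversed-string digit list mutated in place with manual weight-index bookkeeping.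
import Mathlib
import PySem

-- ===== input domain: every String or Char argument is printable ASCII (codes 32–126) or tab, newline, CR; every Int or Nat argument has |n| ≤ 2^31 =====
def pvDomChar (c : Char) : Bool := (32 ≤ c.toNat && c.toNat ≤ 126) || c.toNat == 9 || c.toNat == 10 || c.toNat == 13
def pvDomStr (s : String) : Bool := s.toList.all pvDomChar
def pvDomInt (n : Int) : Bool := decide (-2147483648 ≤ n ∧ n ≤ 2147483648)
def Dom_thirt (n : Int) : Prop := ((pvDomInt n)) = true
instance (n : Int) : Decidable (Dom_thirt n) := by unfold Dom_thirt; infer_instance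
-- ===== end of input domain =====

-- B loops while n >= 100 (the fixed points of the weighted digit sum are exactly the values
-- below 100, so no fixed-point comparison pass is needed) and sums base-100 pairs with one
-- closed formula per weight group, instead of A's reversed-string digit list mutated in place
-- with manual weight-index bookkeeping (objective: alternative).


-- ===== PORT A =====
def thirtLst : List Int := [1, 10, 9, 12, 3, 4]

-- int(c) for a single character; under Pre_ every character is a decimal digit, so the
-- ValueError default 0 is never taken
def thirtCharInt (c : Char) : Int := (PySem.Int.ofChars? [c]).getD 0

-- one step of the inner 'for j in range(len(lofnum))' loop; state = (lofnum, i)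
def thirtInnerStep (st : List Int × Int) (j : Int) : List Int × Int :=
  let i := if st.2 ≥ PySem.List.len thirtLst then 0 else st.2
  (PySem.List.pySetD st.1 j (PySem.List.pyGetD st.1 j 0 * PySem.List.pyGetD thirtLst i 0),
   i + 1)

-- one pass of the outer while-loop body: sum(lofnum) after the in-place weighting
def thirtBody (sumn : Int) : Int :=
  let lofnum := ((PySem.Int.toChars sumn).reverse).map thirtCharInt
  ((PySem.List.pyRange 0 (PySem.List.len lofnum) 1).foldl thirtInnerStep (lofnum, 0)).1.sum

-- the 'while ind' loop; the fuel only makes the recursion total (one pass strictly decreases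
-- any value ≥ 100 and fixes any value in [0, 100), so n.toNat + 2 passes always suffice)
def thirtLoop : Nat → Int → Int
  | 0, sumn => sumn
  | fuel + 1, sumn =>
    let s := thirtBody sumn
    if s = sumn then s else thirtLoop fuel s

def thirt (n : Int) : Int := thirtLoop (n.toNat + 2) n

-- ===== PORT B =====
-- the inner 'while x > 0' loop of B: one base-100 pair per step, weight group j ∈ {0,1,2}
def thirtAltPairs (x : Int) (j : Int) (t : Int) : Int :=
  if 0 < x then
    let p := PySem.Int.mod x 100
    thirtAltPairs (PySem.Int.floordiv x 100) (PySem.Int.mod (j + 1) 3)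
      (t + (if j = 0 then p
            else if j = 1 then 9 * PySem.Int.mod p 10 + 12 * PySem.Int.floordiv p 10
            else 3 * PySem.Int.mod p 10 + 4 * PySem.Int.floordiv p 10))
  else t
termination_by x.toNat
decreasing_by
  simp only [PySem.Int.floordiv, Int.fdiv_eq_ediv]
  omega

-- the outer 'while n >= 100' loop of B; same fuel bound as in the port of A.
-- B's Python raises ValueError on n < 0 before this loop; those inputs are outside Pre_.
def thirtAltLoop : Nat → Int → Int
  | 0, x => x
  | fuel + 1, x => if 100 ≤ x then thirtAltLoop fuel (thirtAltPairs x 0 0) else x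

def thirt_alt (n : Int) : Int := thirtAltLoop (n.toNat + 2) n

-- ===== PRECONDITION & SPEC =====
-- On n < 0 the Python A raises ValueError (int() applied to the '-' sign of the reversed
-- string), and B raises ValueError too; those inputs lie outside Pre_.
def Pre_thirt (n : Int) : Prop := 0 ≤ n
instance (n : Int) : Decidable (Pre_thirt n) := by unfold Pre_thirt; infer_instance
def pvWitness_thirt : Int := 1234

def Spec_thirt (n : Int) (out : Int) : Prop := out = thirt_alt n
instance (n : Int) (out : Int) : Decidable (Spec_thirt n out) := by unfold Spec_thirt; infer_instance

-- ===== CLAIM (what is proved, stated in full; the proofs are below) =====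
def Claim_equal_thirt : Prop := ∀ (n : Int), Dom_thirt n → Pre_thirt n → Spec_thirt n (thirt n)

-- ===== LEMMAS AND PROOFS =====

-- weight used for the digit at (0-based) position k, in both programs
def wAt (k : Nat) : Int := [1, 10, 9, 12, 3, 4].getD (k % 6) 0

-- weighted digit sum of a digit list starting at position k: the common denominator
def wsum : List Int → Nat → Int
  | [], _ => 0
  | d :: ds, k => d * wAt k + wsum ds (k + 1)

-- Int digit list of a natural number (little-endian)
def digitsI (m : Nat) : List Int := (Nat.digits 10 m).map Int.ofNat

theorem wAt_nonneg (k : Nat) : 0 ≤ wAt k := by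
  have h : k % 6 < 6 := Nat.mod_lt _ (by omega)
  unfold wAt
  interval_cases h : k % 6 <;> simp

theorem wAt_le_twelve (k : Nat) : wAt k ≤ 12 := by
  have h : k % 6 < 6 := Nat.mod_lt _ (by omega)
  unfold wAt
  interval_cases h : k % 6 <;> simp

theorem wAt_add_six (k : Nat) : wAt (k + 6) = wAt k := by
  unfold wAt
  rw [Nat.add_mod_right]

theorem wsum_add_six (ds : List Int) : ∀ (k : Nat), wsum ds (k + 6) = wsum ds k := by
  induction ds with
  | nil => intro k; rfl
  | cons d ds ih =>
    intro k
    simp only [wsum, wAt_add_six]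
    rw [show k + 6 + 1 = (k + 1) + 6 by omega, ih]

theorem wsum_map_nonneg (l : List Nat) (k : Nat) :
    0 ≤ wsum (l.map Int.ofNat) k := by
  induction l generalizing k with
  | nil => simp [wsum]
  | cons d ds ih =>
    simp only [List.map_cons, wsum]
    have h1 := wAt_nonneg k
    have h2 := ih (k + 1)
    have h3 : (0 : Int) ≤ Int.ofNat d := Int.natCast_nonneg d
    positivity

theorem wsum_le_twelve_sum (l : List Nat) (k : Nat) :
    wsum (l.map Int.ofNat) k ≤ 12 * (l.sum : Int) := by
  induction l generalizing k with
  | nil => simp [wsum]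
  | cons d ds ih =>
    simp only [List.map_cons, wsum, List.sum_cons, Int.ofNat_eq_natCast]
    have h1 := wAt_le_twelve k
    have h2 := ih (k + 1)
    have h3 : (0 : Int) ≤ Int.ofNat d := Int.natCast_nonneg d
    have h4 : ((d : Int)) * wAt k ≤ 12 * d := by
      calc ((d : Int)) * wAt k ≤ ((d : Int)) * 12 := by
            exact mul_le_mul_of_nonneg_left h1 (by positivity)
        _ = 12 * d := by ring
    push_cast
    push_cast at h2 h4
    linarith

theorem sum_digits_le (m : Nat) : (Nat.digits 10 m).sum ≤ m := by
  induction m using Nat.strong_induction_on with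
  | _ m ih =>
    by_cases h0 : m = 0
    · subst h0; simp
    · rw [Nat.digits_def' (by omega : 1 < 10) (by omega)]
      have := ih (m / 10) (Nat.div_lt_self (by omega) (by omega))
      simp only [List.sum_cons]
      omega

theorem toDigitsCore_eq (f : Nat) : ∀ (m : Nat) (acc : List Char), 0 < m → m < f →
    Nat.toDigitsCore 10 f m acc = ((Nat.digits 10 m).map Nat.digitChar).reverse ++ acc := by
  induction f with
  | zero => intro m acc h1 h2; omega
  | succ f ih =>
    intro m acc h1 h2
    rw [Nat.toDigitsCore]
    rw [Nat.digits_def' (by omega : 1 < 10) h1]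
    by_cases h : m / 10 = 0
    · rw [if_pos h, h]; simp
    · rw [if_neg h, ih (m / 10) _ (by omega) (by omega)]; simp

theorem charInt_digitChar (d : Nat) (h : d < 10) : thirtCharInt (Nat.digitChar d) = (d : Int) := by
  interval_cases d <;> decide

theorem toChars_reverse_map (s : Int) (hs : 0 ≤ s) :
    ((PySem.Int.toChars s).reverse).map thirtCharInt
      = if s = 0 then [0] else digitsI s.toNat := by
  by_cases h0 : s = 0
  · subst h0; decide
  · rw [if_neg h0]
    have hm : 0 < s.toNat := by omega
    unfold PySem.Int.toChars
    rw [if_neg (by omega), Nat.toDigits, toDigitsCore_eq _ _ _ hm (by omega)]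
    rw [List.append_nil, List.reverse_reverse, List.map_map]
    unfold digitsI
    refine List.map_congr_left ?_
    intro d hd
    exact charInt_digitChar d (Nat.digits_lt_base (by omega) hd)

-- the inner for-loop fold of A, generalized over the already-weighted prefix
theorem inner_go (suffix : List Int) : ∀ (pre : List Int) (i : Int),
    (if 6 ≤ i then (0 : Int) else i) = (pre.length : Int) % 6 → 0 ≤ i → i ≤ 6 →
    ((PySem.List.pyRange (pre.length : Int) ((pre.length : Int) + suffix.length) 1).foldl
        thirtInnerStep (pre ++ suffix, i)).1.sum
      = pre.sum + wsum suffix pre.length := by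
  induction suffix with
  | nil =>
    intro pre i _ _ _
    simp [PySem.List.pyRange, wsum]
  | cons d ds ih =>
    intro pre i hinv h0 h6
    rw [PySem.List.pyRange_one_cons (by simp)]
    rw [List.foldl_cons]
    have hstep : thirtInnerStep (pre ++ d :: ds, i) (pre.length : Int)
        = ((pre ++ [d * wAt pre.length]) ++ ds,
           (if 6 ≤ i then (0 : Int) else i) + 1) := by
      unfold thirtInnerStep
      simp only [PySem.List.len_eq]
      have hlst : ((thirtLst.length : Int)) = 6 := by decide
      rw [hlst]
      have hget : PySem.List.pyGetD (pre ++ d :: ds) (pre.length : Int) 0 = d := by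
        simp
      have heff : PySem.List.pyGetD thirtLst (if 6 ≤ i then (0:Int) else i) 0 = wAt pre.length := by
        rw [hinv]
        have : ((pre.length : Int)) % 6 = ((pre.length % 6 : Nat) : Int) := by push_cast; ring
        rw [this, PySem.List.pyGetD_natCast]
        rfl
      have hset : PySem.List.pySetD (pre ++ d :: ds) (pre.length : Int) (d * wAt pre.length)
          = (pre ++ [d * wAt pre.length]) ++ ds := by
        simp [PySem.List.pySetD, PySem.List.pySet?, PySem.List.pyIdx?]
      simp only [ge_iff_le]
      rw [hget, heff, hset]
    rw [hstep]
    have hlen : ((pre ++ [d * wAt pre.length]).length : Int) = (pre.length : Int) + 1 := by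
      simp
    have harith : (pre.length : Int) + ((d :: ds).length : Int)
        = ((pre ++ [d * wAt pre.length]).length : Int) + (ds.length : Int) := by
      simp; ring
    rw [show (pre.length : Int) + 1 = ((pre ++ [d * wAt pre.length]).length : Int) from hlen.symm,
        harith]
    rw [ih (pre ++ [d * wAt pre.length]) _ ?_ (by omega) ?_]
    · simp [wsum]
      ring
    · by_cases hc : (6:Int) ≤ i
      · rw [if_pos hc] at hinv
        rw [hlen]
        split <;> omega
      · rw [if_neg hc] at hinv
        rw [hlen]
        split <;> omega
    · split <;> omega

theorem thirtBody_eq_wsum (s : Int) (hs : 0 ≤ s) :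
    thirtBody s = wsum (if s = 0 then [0] else digitsI s.toNat) 0 := by
  unfold thirtBody
  rw [toChars_reverse_map s hs]
  have h := inner_go (if s = 0 then [0] else digitsI s.toNat) [] 0 (by norm_num)
    (le_refl 0) (by norm_num)
  simpa using h

-- B's pair loop computes the same weighted digit sum
theorem pairs_eq_wsum (m : Nat) : ∀ (j : Nat) (t : Int), j < 3 →
    thirtAltPairs (m : Int) (j : Int) t = t + wsum (digitsI m) (2 * j) := by
  induction m using Nat.strong_induction_on with
  | _ m ih =>
    intro j t hj
    rw [thirtAltPairs]
    by_cases hm : 0 < m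
    · rw [if_pos (by exact_mod_cast hm)]
      have hmod100 : PySem.Int.mod (m : Int) 100 = ((m % 100 : Nat) : Int) := by
        rw [PySem.Int.mod, Int.fmod_eq_emod, if_pos (Or.inl (by omega))]; omega
      have hdiv100 : PySem.Int.floordiv (m : Int) 100 = ((m / 100 : Nat) : Int) := by
        rw [PySem.Int.floordiv, Int.fdiv_eq_ediv, if_pos (Or.inl (by omega))]; omega
      have hmodp10 : PySem.Int.mod ((m % 100 : Nat) : Int) 10 = ((m % 10 : Nat) : Int) := by
        rw [PySem.Int.mod, Int.fmod_eq_emod, if_pos (Or.inl (by omega))]; omega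
      have hdivp10 : PySem.Int.floordiv ((m % 100 : Nat) : Int) 10 = ((m / 10 % 10 : Nat) : Int) := by
        rw [PySem.Int.floordiv, Int.fdiv_eq_ediv, if_pos (Or.inl (by omega))]; omega
      have hj3 : PySem.Int.mod ((j : Int) + 1) 3 = (((j + 1) % 3 : Nat) : Int) := by
        rw [PySem.Int.mod, Int.fmod_eq_emod, if_pos (Or.inl (by omega))]; omega
      simp only [hmod100, hdiv100, hmodp10, hdivp10, hj3]
      rw [ih (m / 100) (Nat.div_lt_self hm (by omega)) ((j + 1) % 3) _ (Nat.mod_lt _ (by omega))]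
      -- arithmetic identity between the pair contribution and two digit terms
      have hsplit : wsum (digitsI m) (2 * j)
          = ((m % 10 : Nat) : Int) * wAt (2 * j) + ((m / 10 % 10 : Nat) : Int) * wAt (2 * j + 1)
            + wsum (digitsI (m / 100)) (2 * j + 2) := by
        by_cases h10 : 10 ≤ m
        · unfold digitsI
          rw [Nat.digits_def' (by omega : 1 < 10) (by omega),
              Nat.digits_def' (by omega : 1 < 10) (by omega : 0 < m / 10)]
          simp only [List.map_cons, wsum, Nat.div_div_eq_div_mul]
          norm_num
          ring
        · unfold digitsI
          rw [Nat.digits_def' (by omega : 1 < 10) (by omega)]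
          have h1 : m / 10 = 0 := by omega
          have h2 : m / 100 = 0 := by omega
          rw [h1, h2]
          simp [wsum]
      rw [hsplit]
      have hnext : wsum (digitsI (m / 100)) (2 * ((j + 1) % 3)) = wsum (digitsI (m / 100)) (2 * j + 2) := by
        interval_cases j
        · rfl
        · rfl
        · exact (wsum_add_six (digitsI (m / 100)) 0).symm
      rw [hnext]
      interval_cases j
      · simp only [show wAt (2 * 0) = 1 from rfl, show wAt (2 * 0 + 1) = 10 from rfl]
        norm_num
        generalize wsum (digitsI (m / 100)) 2 = r
        omega
      · norm_num [show wAt 2 = 9 from rfl, show wAt 3 = 12 from rfl]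
        ring
      · norm_num [show wAt 4 = 3 from rfl, show wAt 5 = 4 from rfl]
        ring
    · have h0 : m = 0 := by omega
      subst h0
      rw [if_neg (by omega)]
      simp [digitsI, wsum]

-- fixed points of A's pass are exactly the values below 100
theorem body_fix (s : Int) (h0 : 0 ≤ s) (h : s < 100) : thirtBody s = s := by
  rw [thirtBody_eq_wsum s h0]
  by_cases hz : s = 0
  · subst hz; simp [wsum, wAt]
  · rw [if_neg hz]
    have hm : 0 < s.toNat := by omega
    unfold digitsI
    by_cases h10 : 10 ≤ s.toNat
    · rw [Nat.digits_def' (by omega : 1 < 10) hm,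
          Nat.digits_def' (by omega : 1 < 10) (by omega : 0 < s.toNat / 10)]
      have : s.toNat / 10 / 10 = 0 := by omega
      rw [this]
      simp [wsum, wAt]
      omega
    · rw [Nat.digits_def' (by omega : 1 < 10) hm]
      have : s.toNat / 10 = 0 := by omega
      rw [this]
      simp [wsum, wAt]
      omega

theorem body_dec (s : Int) (h : 100 ≤ s) : thirtBody s < s := by
  rw [thirtBody_eq_wsum s (by omega), if_neg (by omega)]
  have hm : 100 ≤ s.toNat := by omega
  unfold digitsI
  rw [Nat.digits_def' (by omega : 1 < 10) (by omega),
      Nat.digits_def' (by omega : 1 < 10) (by omega : 0 < s.toNat / 10)]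
  simp only [List.map_cons, wsum, Nat.div_div_eq_div_mul]
  simp only [Int.ofNat_eq_natCast, show (10 * 10 : Nat) = 100 from rfl, show 0 + 1 + 1 = 2 from rfl]
  have hrest : wsum ((Nat.digits 10 (s.toNat / 100)).map Int.ofNat) 2
      ≤ 12 * ((Nat.digits 10 (s.toNat / 100)).sum : Int) :=
    wsum_le_twelve_sum _ 2
  have hds : ((Nat.digits 10 (s.toNat / 100)).sum : Int) ≤ ((s.toNat / 100 : Nat) : Int) := by
    exact_mod_cast sum_digits_le (s.toNat / 100)
  have h100 : (1 : Int) ≤ ((s.toNat / 100 : Nat) : Int) := by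
    have : 1 ≤ s.toNat / 100 := by omega
    exact_mod_cast this
  have hval : s = ((s.toNat % 10 : Nat) : Int) + 10 * ((s.toNat / 10 % 10 : Nat) : Int)
      + 100 * ((s.toNat / 100 : Nat) : Int) := by
    omega
  rw [show wAt 0 = 1 from rfl, show wAt 1 = 10 from rfl]
  nlinarith [hrest, hds, h100, hval]

theorem body_nonneg (s : Int) (hs : 0 ≤ s) : 0 ≤ thirtBody s := by
  rw [thirtBody_eq_wsum s hs]
  by_cases h0 : s = 0
  · subst h0; norm_num [wsum, wAt]
  · rw [if_neg h0]
    exact wsum_map_nonneg _ _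

theorem loop_eq (fuel : Nat) : ∀ (s : Int), 0 ≤ s → thirtLoop fuel s = thirtAltLoop fuel s := by
  induction fuel with
  | zero => intro s _; rfl
  | succ fuel ih =>
    intro s hs
    simp only [thirtLoop, thirtAltLoop]
    by_cases h : 100 ≤ s
    · have hne : thirtBody s ≠ s := by have := body_dec s h; omega
      rw [if_neg hne, if_pos h]
      have hpairs : thirtAltPairs s 0 0 = thirtBody s := by
        have h1 := pairs_eq_wsum s.toNat 0 0 (by omega)
        rw [Int.toNat_of_nonneg hs] at h1
        norm_num at h1
        rw [h1, thirtBody_eq_wsum s hs, if_neg (by omega)]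
      rw [hpairs]
      exact ih _ (body_nonneg s hs)
    · have hfix : thirtBody s = s := body_fix s hs (by omega)
      rw [if_pos hfix, if_neg h, hfix]

-- ===== VERDICT (by name: the statement is the Claim_ definition above) =====
theorem thirt_spec : Claim_equal_thirt := by
  intro n _ hn
  unfold Spec_thirt thirt thirt_alt
  exact loop_eq _ n hn
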